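-- pv_equiv track=rewrite | github.com/artem-xox/agents | src/agents/supporter/forex.py | _extract_currencies
-- ===== SOURCE A (Python) =====
-- def _extract_currencies(message: str) -> list[str]:
--     """Extract currency codes from message."""
--     currency_patterns = {
--         "usd": "USD",
--         "dollar": "USD",
--         "dollars": "USD",
--         "eur": "EUR",
--         "euro": "EUR",
--         "euros": "EUR",
--         "gbp": "GBP",
--         "pound": "GBP",
--         "pounds": "GBP",
--         "jpy": "JPY",
--         "yen": "JPY",
--         "cad": "CAD",
--         "canadian": "CAD",
--         "aud": "AUD",
--         "australian": "AUD",
--         "chf": "CHF",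
--         "franc": "CHF",
--         "swiss": "CHF",
--         "cny": "CNY",
--         "yuan": "CNY",
--         "chinese": "CNY",
--         "rub": "RUB",
--         "ruble": "RUB",
--         "russian": "RUB",
--     }
--
--     message_lower = message.lower()
--     currencies = []
--
--     for pattern, code in currency_patterns.items():
--         if pattern in message_lower and code not in currencies:
--             currencies.append(code)
--
--     return currencies
-- ===== SOURCE B (Python) =====
-- def _extract_currencies(message: str) -> list[str]:
--     """Extract currency codes from message."""
--     groups = [
--         ("USD", ["usd", "dollar", "dollars"]),
--         ("EUR", ["eur", "euro", "euros"]),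
--         ("GBP", ["gbp", "pound", "pounds"]),
--         ("JPY", ["jpy", "yen"]),
--         ("CAD", ["cad", "canadian"]),
--         ("AUD", ["aud", "australian"]),
--         ("CHF", ["chf", "franc", "swiss"]),
--         ("CNY", ["cny", "yuan", "chinese"]),
--         ("RUB", ["rub", "ruble", "russian"]),
--     ]
--     message_lower = message.lower()
--     return [code for code, aliases in groups
--             if any(alias in message_lower for alias in aliases)]
-- ===== Notes on version B (the rewrite author's own statement) =====
-- stated objective: simpler
-- what changed: Regroups the pattern->code dict into code->aliases groups and builds the result as a single comprehension with any(), eliminating the membership-based dedup scan over the result list entirely.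
import Mathlib
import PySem

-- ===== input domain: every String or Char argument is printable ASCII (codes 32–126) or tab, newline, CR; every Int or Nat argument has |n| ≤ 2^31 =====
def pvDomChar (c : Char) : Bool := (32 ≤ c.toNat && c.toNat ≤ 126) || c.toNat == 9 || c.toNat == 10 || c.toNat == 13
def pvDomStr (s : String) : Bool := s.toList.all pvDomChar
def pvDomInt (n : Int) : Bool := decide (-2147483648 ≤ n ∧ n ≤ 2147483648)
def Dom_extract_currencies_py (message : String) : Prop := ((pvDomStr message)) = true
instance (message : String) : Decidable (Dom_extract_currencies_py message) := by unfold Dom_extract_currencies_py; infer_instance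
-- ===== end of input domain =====

-- B regroups the pattern->code dict into code->aliases groups and builds the result in one
-- pass with an any() test per code, dropping A's membership-based dedup scan (objective: simpler).

-- ===== PORT A =====
-- the currency_patterns dict, in insertion order (pattern, code)
def pvPatternsA : List (String × String) :=
  [("usd", "USD"), ("dollar", "USD"), ("dollars", "USD"),
   ("eur", "EUR"), ("euro", "EUR"), ("euros", "EUR"),
   ("gbp", "GBP"), ("pound", "GBP"), ("pounds", "GBP"),
   ("jpy", "JPY"), ("yen", "JPY"),
   ("cad", "CAD"), ("canadian", "CAD"),
   ("aud", "AUD"), ("australian", "AUD"),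
   ("chf", "CHF"), ("franc", "CHF"), ("swiss", "CHF"),
   ("cny", "CNY"), ("yuan", "CNY"), ("chinese", "CNY"),
   ("rub", "RUB"), ("ruble", "RUB"), ("russian", "RUB")]

def extract_currencies_py (message : String) : List String :=
  let message_lower := PySem.Str.lower message
  pvPatternsA.foldl
    (fun currencies pc =>
      if PySem.Str.isIn pc.1 message_lower && !(currencies.contains pc.2)
      then currencies ++ [pc.2] else currencies)
    []

-- ===== PORT B =====
-- groups: (code, aliases), codes in the same order as A's dict
def pvGroupsB : List (String × List String) :=
  [("USD", ["usd", "dollar", "dollars"]),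
   ("EUR", ["eur", "euro", "euros"]),
   ("GBP", ["gbp", "pound", "pounds"]),
   ("JPY", ["jpy", "yen"]),
   ("CAD", ["cad", "canadian"]),
   ("AUD", ["aud", "australian"]),
   ("CHF", ["chf", "franc", "swiss"]),
   ("CNY", ["cny", "yuan", "chinese"]),
   ("RUB", ["rub", "ruble", "russian"])]

def extract_currencies_py_alt (message : String) : List String :=
  let message_lower := PySem.Str.lower message
  (pvGroupsB.filter (fun g => g.2.any (fun al => PySem.Str.isIn al message_lower))).map
    (fun g => g.1)

-- ===== PRECONDITION & SPEC =====
def Spec_extract_currencies_py (message : String) (out : List String) : Prop := out = extract_currencies_py_alt message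
instance (message : String) (out : List String) : Decidable (Spec_extract_currencies_py message out) := by unfold Spec_extract_currencies_py; infer_instance

-- ===== CLAIM (what is proved, stated in full; the proofs are below) =====
def Claim_equal_extract_currencies_py : Prop := ∀ (message : String), Dom_extract_currencies_py message → Spec_extract_currencies_py message (extract_currencies_py message)

-- ===== LEMMAS AND PROOFS =====

-- A's loop body, abstracted over the match test m
def pvStepA (m : String → Bool) (currencies : List String) (pc : String × String) : List String :=
  if m pc.1 && !(currencies.contains pc.2) then currencies ++ [pc.2] else currencies

-- once the code is already in the state, A's loop over further aliases of that code does nothing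
theorem pvFoldA_mem (m : String → Bool) (c : String) (as : List String) (s : List String)
    (h : c ∈ s) :
    (as.map (fun a => (a, c))).foldl (pvStepA m) s = s := by
  induction as with
  | nil => rfl
  | cons a as ih =>
      simp only [List.map_cons, List.foldl_cons, pvStepA]
      have hc : (m a && !(s.contains c)) = false := by simp [h]
      rw [hc]
      simpa using ih

-- A's loop over the consecutive aliases of one fresh code appends the code iff some alias matches
theorem pvFoldA_group (m : String → Bool) (c : String) (as : List String) (s : List String)
    (h : c ∉ s) :
    (as.map (fun a => (a, c))).foldl (pvStepA m) s
      = if as.any m then s ++ [c] else s := by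
  induction as with
  | nil => rfl
  | cons a as ih =>
      simp only [List.map_cons, List.foldl_cons]
      by_cases hm : m a = true
      · have hc : (m a && !(s.contains c)) = true := by simp [hm, h]
        simp only [pvStepA, hc, if_true]
        rw [pvFoldA_mem m c as (s ++ [c]) (by simp)]
        simp [hm]
      · have hc : (m a && !(s.contains c)) = false := by simp [hm]
        simp only [pvStepA, hc, Bool.false_eq_true, if_false]
        rw [ih, List.any_cons]
        simp [hm]

-- A's fold over the flattened groups equals B's filter-map, for any group list with distinct
-- codes none of which is already in the state
theorem pvFold_eq (m : String → Bool) (gs : List (String × List String)) (s : List String)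
    (hnd : (gs.map Prod.fst).Nodup) (hs : ∀ g ∈ gs, g.1 ∉ s) :
    (gs.flatMap (fun g => g.2.map (fun a => (a, g.1)))).foldl (pvStepA m) s
      = s ++ (gs.filter (fun g => g.2.any m)).map Prod.fst := by
  induction gs generalizing s with
  | nil => simp
  | cons g gs ih =>
      rw [List.map_cons, List.nodup_cons] at hnd
      simp only [List.flatMap_cons, List.foldl_append]
      rw [pvFoldA_group m g.1 g.2 s (hs g (by simp))]
      by_cases hm : g.2.any m = true
      · rw [if_pos hm, ih (s ++ [g.1]) hnd.2 ?_]
        · simp [hm]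
        · intro g' hg' hmem
          rcases List.mem_append.mp hmem with h1 | h1
          · exact hs g' (List.mem_cons_of_mem _ hg') h1
          · have he : g'.1 = g.1 := by simpa using h1
            exact hnd.1 (List.mem_map.mpr ⟨g', hg', he⟩)
      · rw [if_neg hm, ih s hnd.2 (fun g' hg' => hs g' (List.mem_cons_of_mem _ hg'))]
        simp [hm]

-- A's flat (pattern, code) list is exactly B's groups flattened
theorem pvPatterns_eq_flatten :
    pvPatternsA = pvGroupsB.flatMap (fun g => g.2.map (fun a => (a, g.1))) := by rfl

-- ===== VERDICT (by name: the statement is the Claim_ definition above) =====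
theorem extract_currencies_py_spec : Claim_equal_extract_currencies_py := by
  intro message _
  show extract_currencies_py message = extract_currencies_py_alt message
  have h := pvFold_eq (fun p => PySem.Str.isIn p (PySem.Str.lower message)) pvGroupsB []
    (by simp [pvGroupsB]) (by simp)
  rw [← pvPatterns_eq_flatten] at h
  exact h
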